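-- pv_equiv track=rewrite | github.com/bc36/leetcode | lc_Python/lc2300_2399.py | countSpecialNumbers
-- ===== SOURCE A (Python) =====
-- def countSpecialNumbers(n: int) -> int:
--     # all numbers
--     nums = []
--     while n:
--         nums.append(n % 10)
--         n //= 10
--     ans = 0
--     # all numbers that length < m, m is the length of original number
--     for i in range(1, len(nums)):
--         t = k = 9
--         for j in range(i - 1):  # calculate permutation
--             t *= k
--             k -= 1
--         ans += t
--     nums.reverse()
--     vis = [0] * 10
--     for i in range(len(nums)):
--         for j in range(int(i == 0), nums[i]):  # no leading zore
--             if vis[j]: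
--                 continue
--             t = 1
--             u = 9 - i
--             for k in range(len(nums) - i - 1):  # calculate permutation
--                 t *= u
--                 u -= 1
--             ans += t
--         if vis[nums[i]]:
--             break
--         vis[nums[i]] = True
--
--     # whether original number is qualified
--     s = set(nums)
--     if len(s) == len(nums):
--         ans += 1
--     return ans
-- ===== SOURCE B (Python) =====
-- def countSpecialNumbers(n: int) -> int:
--     # Digit-DP: count numbers in [0, n] whose decimal digits are all distinct,
--     # then drop the count for 0 when n >= 1 (A counts 1..n, but returns 1 for n = 0).
--     def digits(m):
--         return digits(m // 10) + [m % 10] if m else []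
--
--     ds = digits(n)
--     memo = {}
--
--     def count(pos, mask, tight, started):
--         key = (pos, mask, tight, started)
--         if key in memo:
--             return memo[key]
--         if pos == len(ds):
--             res = 1
--         else:
--             hi = ds[pos] if tight else 9
--             res = 0
--             for j in range(hi + 1):
--                 if not started and j == 0:
--                     res += count(pos + 1, mask, tight and j == hi, False)
--                 elif not (mask >> j) & 1:
--                     res += count(pos + 1, mask | (1 << j), tight and j == hi, True)
--         memo[key] = res
--         return res
--
--     return count(0, 0, True, False) - (1 if n >= 1 else 0)
-- ===== Notes on version B (the rewrite author's own statement) =====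
-- stated objective: alternative
-- what changed: Replaced A's closed-form permutation-product loops (separate shorter-length summation, explicit vis array with break, set-size final check) by a single memoized digit-DP recursion over the decimal digits of n with state (position, bitmask of used digits, tight flag, started flag), counting distinct-digit numbers in [0,n] and subtracting 1 when n >= 1 to exclude 0; Pre_ excludes n < 0, where A's 'while n' / 'n //= 10' loop never terminates.
import Mathlib
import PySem

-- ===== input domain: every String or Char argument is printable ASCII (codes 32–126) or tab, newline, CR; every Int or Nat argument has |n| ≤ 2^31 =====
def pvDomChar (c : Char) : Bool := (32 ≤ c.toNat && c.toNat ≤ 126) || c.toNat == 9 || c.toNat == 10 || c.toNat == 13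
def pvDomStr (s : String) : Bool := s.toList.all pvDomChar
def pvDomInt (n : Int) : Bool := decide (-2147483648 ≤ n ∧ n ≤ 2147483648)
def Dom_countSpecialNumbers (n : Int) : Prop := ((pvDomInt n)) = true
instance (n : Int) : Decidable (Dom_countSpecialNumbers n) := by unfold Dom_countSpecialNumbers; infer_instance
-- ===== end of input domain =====

-- B replaces A's closed-form permutation-product loops by a memoized digit-DP recursion
-- (position, used-digit bitmask, tight flag, started flag) over the digits of n: an
-- alternative algorithm of similar cost. Pre_ excludes n < 0, where A never terminates.


-- ===== PORT A =====
-- the `while n:` digit loop; for n < 0 the Python loop never terminates (excluded by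
-- Pre_), the port returns [] there only to be total
def aDigits (n : Int) : List Int :=
  if 0 < n then PySem.Int.mod n 10 :: aDigits (PySem.Int.floordiv n 10)
  else []
termination_by n.toNat
decreasing_by
  rw [PySem.Int.floordiv_eq_ediv_of_pos (by omega : (0:Int) < 10)]
  omega

-- `for i in range(len(nums)):` with its `break`, as recursion on the remaining suffix;
-- vis is read with pyGetD and written with pySetD (indices are digits 0..9, in range)
def aLoop (nums : List Int) (rest : List Int) (i : Nat) (vis : List Int) (ans : Int) : Int :=
  match rest with
  | [] => ans
  | d :: rest' =>
    let ans := (PySem.List.pyRange (if i = 0 then 1 else 0) d 1).foldl (fun ans j =>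
      if PySem.List.pyGetD vis j 0 ≠ 0 then ans
      else ans + ((PySem.List.pyRange 0 ((nums.length : Int) - (i : Int) - 1) 1).foldl
          (fun (tu : Int × Int) _ => (tu.1 * tu.2, tu.2 - 1)) ((1 : Int), 9 - (i : Int))).1) ans
    if PySem.List.pyGetD vis d 0 ≠ 0 then ans
    else aLoop nums rest' (i + 1) (PySem.List.pySetD vis d 1) ans

def countSpecialNumbers (n : Int) : Int :=
  let nums := aDigits n
  let ans : Int := (PySem.List.pyRange 1 (nums.length : Int) 1).foldl (fun ans i =>
    ans + ((PySem.List.pyRange 0 (i - 1) 1).foldl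
        (fun (tu : Int × Int) _ => (tu.1 * tu.2, tu.2 - 1)) ((9 : Int), (9 : Int))).1) 0
  let nums := nums.reverse
  let ans := aLoop nums nums 0 (List.replicate 10 (0 : Int)) ans
  if (PySem.Set.ofList nums).length = nums.length then ans + 1 else ans

-- ===== PORT B =====
-- Source B's recursive `digits(m)` helper, most-significant digit first (for n < 0 the
-- Python recursion never terminates — excluded by Pre_ — and the port returns [])
def bDigits (m : Int) : List Int :=
  if 0 < m then bDigits (PySem.Int.floordiv m 10) ++ [PySem.Int.mod m 10]
  else []
termination_by m.toNat
decreasing_by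
  rw [PySem.Int.floordiv_eq_ediv_of_pos (by omega : (0:Int) < 10)]
  omega

-- Source B's `count(pos, mask, tight, started)` digit-DP recursion (the memo dict caches a
-- pure function and is dropped; the suffix ds[pos:] stands for the index pos)
def bCount (ds : List Int) (mask : Nat) (tight started : Bool) : Int :=
  match ds with
  | [] => 1
  | d :: rest =>
    let hi : Int := if tight then d else 9
    (PySem.List.pyRange 0 (hi + 1) 1).foldl (fun res j =>
      if !started && j == 0 then
        res + bCount rest mask (tight && (j == hi)) false
      else if (mask >>> j.toNat) &&& 1 == 0 then
        res + bCount rest (mask ||| (1 <<< j.toNat)) (tight && (j == hi)) true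
      else res) 0

def countSpecialNumbers_alt (n : Int) : Int :=
  bCount (bDigits n) 0 true false - (if 1 ≤ n then 1 else 0)

-- ===== PRECONDITION & SPEC =====
-- A's `while n:` loop diverges for every n < 0 (n //= 10 stalls at -1), so A returns
-- exactly on 0 ≤ n
def Pre_countSpecialNumbers (n : Int) : Prop := 0 ≤ n
instance (n : Int) : Decidable (Pre_countSpecialNumbers n) := by unfold Pre_countSpecialNumbers; infer_instance
def pvWitness_countSpecialNumbers : Int := 5

def Spec_countSpecialNumbers (n : Int) (out : Int) : Prop := out = countSpecialNumbers_alt n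
instance (n : Int) (out : Int) : Decidable (Spec_countSpecialNumbers n out) := by unfold Spec_countSpecialNumbers; infer_instance

-- ===== CLAIM (what is proved, stated in full; the proofs are below) =====
def Claim_equal_countSpecialNumbers : Prop := ∀ (n : Int), Dom_countSpecialNumbers n → Pre_countSpecialNumbers n → Spec_countSpecialNumbers n (countSpecialNumbers n)

-- ===== LEMMAS AND PROOFS =====

-- falling factorial a·(a-1)·…·(a-k+1): the value of both versions' permutation products
def ffall (a : Int) : Nat → Int
  | 0 => 1
  | k + 1 => a * ffall (a - 1) k

-- the bit test Source B uses, as a named predicate ("digit jn is unused in mask")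
def freeB (mask jn : Nat) : Bool := (mask >>> jn) &&& 1 == 0

def usedCt (mask : Nat) : Nat := (List.range 10).countP (fun j => !freeB mask j)

-- A's vis list as a function of B's bitmask
def visOf (mask : Nat) : List Int := (List.range 10).map (fun j => if freeB mask j then (0 : Int) else 1)

-- "the digits of l are pairwise distinct and all free in mask", threaded the way the
-- tight path of bCount threads its mask
def chainOK (mask : Nat) : List Int → Bool
  | [] => true
  | d :: r => freeB mask d.toNat && chainOK (mask ||| (1 <<< d.toNat)) r

-- Σ_{i=1}^{k} 9·ffall 9 (i-1): the special numbers with fewer digits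
def Slen : Nat → Int
  | 0 => 0
  | k + 1 => Slen k + 9 * ffall 9 k

theorem freeB_eq (m j : Nat) : freeB m j = !m.testBit j := by
  simp only [freeB, Nat.testBit, Nat.and_one_is_mod, Nat.one_and_eq_mod_two]
  rcases Nat.mod_two_eq_zero_or_one (m >>> j) with h | h <;> simp [h]

theorem free_or (m d e : Nat) : freeB (m ||| (1 <<< d)) e = (freeB m e && !(d == e)) := by
  simp [freeB_eq, Nat.testBit_or, Nat.shiftLeft_eq, Nat.testBit_two_pow]
  cases h : m.testBit e <;> cases h2 : decide (d = e) <;> simp_all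

theorem countP_or_mem {p : Nat → Bool} {l : List Nat} {d : Nat} (hl : l.Nodup) (hd : d ∈ l)
    (hpd : p d = false) :
    l.countP (fun j => p j || j == d) = l.countP p + 1 := by
  induction l with
  | nil => cases hd
  | cons x tl ih =>
    rcases List.nodup_cons.mp hl with ⟨hx, htl⟩
    by_cases hxd : x = d
    · subst hxd
      have : tl.countP (fun j => p j || j == x) = tl.countP p := by
        apply List.countP_congr
        intro a ha
        have : a ≠ x := fun h => hx (h ▸ ha)
        simp [this]
      simp [hpd, this]
    · have hd' : d ∈ tl := by
        rcases List.mem_cons.mp hd with h | h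
        · exact absurd h.symm hxd
        · exact h
      have := ih htl hd'
      simp only [List.countP_cons, this]
      have : (x == d) = false := by simp [hxd]
      simp [this]
      omega

theorem usedCt_or (m d : Nat) (hd : d < 10) (hfree : freeB m d = true) :
    usedCt (m ||| (1 <<< d)) = usedCt m + 1 := by
  unfold usedCt
  have : (List.range 10).countP (fun j => !freeB (m ||| 1 <<< d) j)
      = (List.range 10).countP (fun j => (!freeB m j) || j == d) := by
    apply List.countP_congr
    intro a _
    rw [free_or]
    cases h : freeB m a <;> cases h2 : freeB m a == false <;>
      simp_all [Bool.not_not, eq_comm (a := d)]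
  rw [this]
  exact countP_or_mem (List.nodup_range) (List.mem_range.mpr hd) (by simp [hfree])

theorem used_le (m : Nat) : usedCt m ≤ 10 := by
  simpa using List.countP_le_length (l := List.range 10) (p := fun j => !freeB m j)

theorem count_free (m : Nat) :
    (PySem.List.pyRange 0 10 1).countP (fun j => freeB m j.toNat) = 10 - usedCt m := by
  have h10 : PySem.List.pyRange 0 10 1 = (List.range 10).map (fun k : Nat => (k : Int)) := by decide
  rw [h10, List.countP_map]
  unfold usedCt
  have : ∀ l : List Nat, l.countP ((fun j : Int => freeB m j.toNat) ∘ (fun k : Nat => (k : Int)))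
      + l.countP (fun j => !freeB m j) = l.length := by
    intro l
    induction l with
    | nil => simp
    | cons x tl ih =>
      simp only [List.countP_cons, Function.comp]
      cases h : freeB m x <;> simp [h, Int.toNat_natCast] at * <;> omega
  have := this (List.range 10)
  simp at this
  omega

theorem vis_get (m : Nat) (jn : Nat) (hj : jn < 10) :
    PySem.List.pyGetD (visOf m) ((jn : Nat) : Int) 0 = if freeB m jn then 0 else 1 := by
  rw [PySem.List.pyGetD_natCast]
  unfold visOf
  rw [List.getD_eq_getElem?_getD]
  simp [hj]

theorem vis_set (m : Nat) (dn : Nat) (hd : dn < 10) :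
    (visOf m).set dn 1 = visOf (m ||| (1 <<< dn)) := by
  apply List.ext_getElem
  · simp [visOf]
  intro i h1 h2
  simp only [visOf, List.length_map, List.length_range] at h1 h2
  rw [List.getElem_set]
  simp only [visOf, List.getElem_map, List.getElem_range]
  by_cases hid : dn = i
  · subst hid
    rw [if_pos rfl, free_or]
    simp
  · rw [if_neg hid, free_or]
    have : (dn == i) = false := by simp [hid]
    simp [this]

theorem freeB_zero (jn : Nat) : freeB 0 jn = true := by
  simp [freeB, Nat.zero_shiftRight]

theorem usedCt_zero : usedCt 0 = 0 := by decide

theorem foldl_prod (l : List Int) : ∀ (t u : Int),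
    l.foldl (fun (tu : Int × Int) _ => (tu.1 * tu.2, tu.2 - 1)) (t, u)
      = (t * ffall u l.length, u - l.length) := by
  induction l with
  | nil => intro t u; simp [ffall]
  | cons x l ih =>
    intro t u
    simp only [List.foldl_cons, List.length_cons, ih (t * u) (u - 1)]
    refine Prod.ext ?_ ?_
    · simp [ffall, mul_assoc]
    · push_cast; ring

theorem perm_val (b : Int) (t u : Int) :
    ((PySem.List.pyRange 0 b 1).foldl (fun (tu : Int × Int) _ => (tu.1 * tu.2, tu.2 - 1)) (t, u)).1
      = t * ffall u (b.toNat) := by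
  rw [foldl_prod]
  simp [PySem.List.length_pyRange_one]

theorem foldl_if_add (p : Int → Bool) (c : Int) (l : List Int) : ∀ (a : Int),
    l.foldl (fun acc j => if p j then acc + c else acc) a = a + (l.countP p) * c := by
  induction l with
  | nil => intro a; simp
  | cons x l ih =>
    intro a
    by_cases h : p x
    · simp [h, ih]; ring
    · simp [h, ih]

-- cons-step unfoldings of bCount in its three modes (booleans reduced)
theorem bCount_cons_free (d : Int) (rest : List Int) (mask : Nat) :
    bCount (d :: rest) mask false true
      = (PySem.List.pyRange 0 10 1).foldl
          (fun res j => if freeB mask j.toNat then res + bCount rest (mask ||| (1 <<< j.toNat)) false true else res) 0 := by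
  rw [bCount]
  norm_num [freeB]

theorem bCount_cons_skip (d : Int) (rest : List Int) :
    bCount (d :: rest) 0 false false
      = (PySem.List.pyRange 0 10 1).foldl
          (fun res (j : Int) => if j == 0 then res + bCount rest 0 false false
            else res + bCount rest (1 <<< j.toNat) false true) 0 := by
  rw [bCount]
  norm_num [freeB, Nat.zero_shiftRight, Nat.zero_or]

theorem bCount_cons_tight (d : Int) (rest : List Int) (mask : Nat) :
    bCount (d :: rest) mask true true
      = (PySem.List.pyRange 0 (d + 1) 1).foldl
          (fun res j => if freeB mask j.toNat then res + bCount rest (mask ||| (1 <<< j.toNat)) (j == d) true else res) 0 := by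
  rw [bCount]
  norm_num [freeB]

theorem bCount_cons_top (d : Int) (rest : List Int) :
    bCount (d :: rest) 0 true false
      = (PySem.List.pyRange 0 (d + 1) 1).foldl
          (fun res (j : Int) => if j == 0 then res + bCount rest 0 (j == d) false
            else res + bCount rest (1 <<< j.toNat) (j == d) true) 0 := by
  rw [bCount]
  norm_num [freeB, Nat.zero_shiftRight, Nat.zero_or]

-- B's free phase: once tight and leading zeros are gone, bCount is a falling factorial
theorem bCount_free : ∀ (rest : List Int) (mask : Nat),
    bCount rest mask false true = ffall (10 - (usedCt mask : Int)) rest.length := by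
  intro rest
  induction rest with
  | nil => intro mask; simp [bCount, ffall]
  | cons d rest ih =>
    intro mask
    rw [bCount_cons_free]
    have hstep : ∀ (acc j : Int), j ∈ PySem.List.pyRange 0 10 1 →
        (if freeB mask j.toNat then acc + bCount rest (mask ||| (1 <<< j.toNat)) false true else acc)
          = (if freeB mask j.toNat then acc + ffall (9 - (usedCt mask : Int)) rest.length else acc) := by
      intro acc j hj
      have hj' := (PySem.List.mem_pyRange_one).mp hj
      by_cases hf : freeB mask j.toNat
      · rw [if_pos hf, if_pos hf, ih, usedCt_or mask j.toNat (by omega) hf]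
        congr 2
        push_cast
        ring
      · rw [if_neg hf, if_neg hf]
    have hfold := PySem.List.foldl_congr_mem _ _ _ 0 hstep
    rw [hfold, foldl_if_add (fun j => freeB mask j.toNat) _ _ 0, count_free]
    have h1 : ((10 - usedCt mask : Nat) : Int) = 10 - (usedCt mask : Int) := by
      have := used_le mask; omega
    have h2 : (10 : Int) - (usedCt mask : Int) - 1 = 9 - (usedCt mask : Int) := by ring
    simp only [List.length_cons, ffall, h1, h2]
    ring

-- B's not-started phase: counts 0 and every shorter special number
theorem bCount_skip : ∀ (rest : List Int), bCount rest 0 false false = 1 + Slen rest.length := by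
  intro rest
  induction rest with
  | nil => simp [bCount, Slen]
  | cons d rest ih =>
    rw [bCount_cons_skip,
      PySem.List.pyRange_one_cons (by norm_num : (0:Int) < 10), List.foldl_cons]
    have h00 : ((0 : Int) == 0) = true := by decide
    rw [if_pos h00, ih]
    simp only [zero_add]
    have hstep : ∀ (acc j : Int), j ∈ PySem.List.pyRange 1 10 1 →
        (if j == 0 then acc + (1 + Slen rest.length)
          else acc + bCount rest (1 <<< j.toNat) false true)
          = acc + ffall 9 rest.length := by
      intro acc j hj
      have hj' := (PySem.List.mem_pyRange_one).mp hj
      have hne : (j == 0) = false := by simp; omega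
      rw [if_neg (by simp [hne] : ¬ (j == 0) = true), bCount_free]
      have hu : usedCt (1 <<< j.toNat) = 1 := by
        have h := usedCt_or 0 j.toNat (by omega) (freeB_zero j.toNat)
        simpa [usedCt_zero] using h
      rw [hu]
      norm_num
    have hfold := PySem.List.foldl_congr_mem _ _ _ (1 + Slen rest.length) hstep
    rw [hfold, PySem.List.foldl_add]
    have hsum : ((PySem.List.pyRange 1 10 1).map (fun _ => ffall 9 rest.length)).sum
        = 9 * ffall 9 rest.length := by
      rw [PySem.List.sum_map_const_int]
      norm_num [PySem.List.length_pyRange_one]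
    rw [hsum]
    simp only [List.length_cons, Slen]
    ring

-- accumulator shift for the inner-loop shape of aLoop
theorem foldl_skip_acc (p : Int → Prop) [DecidablePred p] (f : Int → Int) (l : List Int) :
    ∀ (a : Int), l.foldl (fun acc j => if p j then acc else acc + f j) a
      = a + l.foldl (fun acc j => if p j then acc else acc + f j) 0 := by
  induction l with
  | nil => intro a; simp
  | cons x l ih =>
    intro a
    by_cases h : p x
    · simp only [List.foldl_cons, if_pos h]; exact ih a
    · simp only [List.foldl_cons, if_neg h]
      rw [ih (a + f x), ih (0 + f x)]
      ring

theorem aLoop_acc (nums : List Int) : ∀ (rest : List Int) (i : Nat) (vis : List Int) (a : Int),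
    aLoop nums rest i vis a = a + aLoop nums rest i vis 0 := by
  intro rest
  induction rest with
  | nil => intro i vis a; simp [aLoop]
  | cons d rest ih =>
    intro i vis a
    simp only [aLoop]
    rw [foldl_skip_acc (fun j => PySem.List.pyGetD vis j 0 ≠ 0) _ _ a]
    by_cases h : PySem.List.pyGetD vis d 0 ≠ 0
    · rw [if_pos h, if_pos h]
    · rw [if_neg h, if_neg h]
      rw [ih _ _ (a + _), ih _ _ (List.foldl _ 0 _)]
      ring

-- the tight spine: bCount along the digits equals A's vis loop plus 1 for n itself
-- exactly when the digits seen so far together with the rest are pairwise distinct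
theorem bCount_tight : ∀ (rest : List Int) (i : Nat) (mask : Nat) (nums : List Int),
    1 ≤ i → usedCt mask = i → nums.length = i + rest.length →
    (∀ d ∈ rest, 0 ≤ d ∧ d < 10) →
    bCount rest mask true true
      = aLoop nums rest i (visOf mask) 0 + (if chainOK mask rest then 1 else 0) := by
  intro rest
  induction rest with
  | nil =>
    intro i mask nums _ _ _ _
    simp [bCount, aLoop, chainOK]
  | cons d rest ih =>
    intro i mask nums h1i hu hlen hb
    obtain ⟨hd0, hd10⟩ := hb d (List.mem_cons_self)
    have hbr : ∀ e ∈ rest, 0 ≤ e ∧ e < 10 := fun e he => hb e (List.mem_cons_of_mem _ he)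
    have hdn : d.toNat < 10 := by omega
    -- the common value added for every admissible smaller digit
    set c : Int := ffall (9 - (i : Int)) rest.length with hc
    -- B side
    rw [bCount_cons_tight,
      PySem.List.pyRange_one_succ_right (by omega : (0:Int) ≤ d), List.foldl_append]
    have hstepB : ∀ (acc j : Int), j ∈ PySem.List.pyRange 0 d 1 →
        (if freeB mask j.toNat then acc + bCount rest (mask ||| (1 <<< j.toNat)) (j == d) true else acc)
          = (if freeB mask j.toNat then acc + c else acc) := by
      intro acc j hj
      have hj' := (PySem.List.mem_pyRange_one).mp hj
      have hjd : (j == d) = false := by simp; omega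
      by_cases hf : freeB mask j.toNat
      · rw [if_pos hf, if_pos hf, hjd, bCount_free,
          usedCt_or mask j.toNat (by omega) hf, hu, hc]
        congr 2
        push_cast
        ring
      · rw [if_neg hf, if_neg hf]
    have hfoldB := PySem.List.foldl_congr_mem _ _ _ 0 hstepB
    rw [hfoldB]
    -- A side
    simp only [aLoop]
    rw [if_neg (by omega : ¬ i = 0)]
    have hstepA : ∀ (acc j : Int), j ∈ PySem.List.pyRange 0 d 1 →
        (if PySem.List.pyGetD (visOf mask) j 0 ≠ 0 then acc
          else acc + ((PySem.List.pyRange 0 ((nums.length : Int) - (i : Int) - 1) 1).foldl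
              (fun (tu : Int × Int) _ => (tu.1 * tu.2, tu.2 - 1)) ((1 : Int), 9 - (i : Int))).1)
          = (if freeB mask j.toNat then acc + c else acc) := by
      intro acc j hj
      have hj' := (PySem.List.mem_pyRange_one).mp hj
      have hjcast : ((j.toNat : Nat) : Int) = j := Int.toNat_of_nonneg hj'.1
      have hget : PySem.List.pyGetD (visOf mask) j 0
          = if freeB mask j.toNat then 0 else 1 := by
        rw [← hjcast]; exact vis_get mask j.toNat (by omega)
      have hbound : (nums.length : Int) - (i : Int) - 1 = ((rest.length : Nat) : Int) := by
        rw [hlen]; push_cast [List.length_cons]; omega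
      by_cases hf : freeB mask j.toNat
      · rw [if_pos hf] at hget
        rw [if_neg (by simp [hget]), if_pos hf, hbound, perm_val]
        simp [hc]
      · rw [if_neg hf] at hget
        rw [if_pos (by simp [hget]), if_neg hf]
    have hfoldA := PySem.List.foldl_congr_mem _ _ _ 0 hstepA
    rw [hfoldA]
    -- both prefix folds now agree; handle the final tight digit
    set S : Int := (PySem.List.pyRange 0 d 1).foldl (fun acc j => if freeB mask j.toNat then acc + c else acc) 0 with hS
    simp only [List.foldl_cons, List.foldl_nil]
    have hgd : PySem.List.pyGetD (visOf mask) d 0 = if freeB mask d.toNat then 0 else 1 := by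
      have hdcast : ((d.toNat : Nat) : Int) = d := Int.toNat_of_nonneg hd0
      rw [← hdcast]; exact vis_get mask d.toNat hdn
    have hdd : (d == d) = true := by simp
    rw [chainOK]
    by_cases hf : freeB mask d.toNat
    · rw [if_pos hf, hdd]
      rw [if_pos hf] at hgd
      rw [if_neg (by simp [hgd])]
      have hvs : PySem.List.pySetD (visOf mask) d 1 = visOf (mask ||| (1 <<< d.toNat)) := by
        rw [PySem.List.pySetD_of_nonneg (visOf mask) 1 hd0]
        exact vis_set mask d.toNat hdn
      rw [hvs, aLoop_acc,
        ih (i + 1) (mask ||| (1 <<< d.toNat)) nums (by omega)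
          (by rw [usedCt_or mask d.toNat hdn hf, hu])
          (by rw [hlen]; simp [List.length_cons]; omega) hbr]
      simp [hf]
      ring
    · rw [if_neg hf]
      rw [if_neg hf] at hgd
      rw [if_pos (by simp [hgd])]
      have : (freeB mask d.toNat && chainOK (mask ||| 1 <<< d.toNat) rest) = false := by
        simp [hf]
      rw [this]
      simp

theorem chainOK_nodup : ∀ (l : List Int) (mask : Nat),
    (∀ d ∈ l, 0 ≤ d ∧ d < 10) →
    (chainOK mask l = true ↔ l.Nodup ∧ ∀ d ∈ l, freeB mask d.toNat = true) := by
  intro l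
  induction l with
  | nil => intro mask _; simp [chainOK]
  | cons d r ih =>
    intro mask hb
    obtain ⟨hd0, hd10⟩ := hb d (List.mem_cons_self)
    have hbr : ∀ e ∈ r, 0 ≤ e ∧ e < 10 := fun e he => hb e (List.mem_cons_of_mem _ he)
    rw [chainOK, Bool.and_eq_true, ih (mask ||| (1 <<< d.toNat)) hbr]
    constructor
    · rintro ⟨hfd, hnr, hfr⟩
      have hnotmem : d ∉ r := by
        intro hmem
        have h := hfr d hmem
        rw [free_or] at h
        simp at h
      refine ⟨List.nodup_cons.mpr ⟨hnotmem, hnr⟩, ?_⟩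
      intro e he
      rcases List.mem_cons.mp he with rfl | he'
      · exact hfd
      · have h := hfr e he'
        rw [free_or, Bool.and_eq_true] at h
        exact h.1
    · rintro ⟨hnd, hall⟩
      obtain ⟨hnotmem, hnr⟩ := List.nodup_cons.mp hnd
      refine ⟨hall d (List.mem_cons_self), hnr, ?_⟩
      intro e he
      obtain ⟨he0, he10⟩ := hbr e he
      have hne : d ≠ e := fun h => hnotmem (h ▸ he)
      have hnetn : d.toNat ≠ e.toNat := by omega
      rw [free_or, Bool.and_eq_true]
      exact ⟨hall e (List.mem_cons_of_mem _ he), by simp [hnetn]⟩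

theorem ofList_sublist (l : List Int) : (PySem.Set.ofList l).Sublist l := by
  induction l using List.reverseRecOn with
  | nil => simp [PySem.Set.ofList_nil]
  | append_singleton xs x ih =>
    rw [PySem.Set.ofList_append_singleton]
    unfold PySem.Set.add
    by_cases h : PySem.Set.contains (PySem.Set.ofList xs) x
    · rw [if_pos h]
      exact ih.trans (List.sublist_append_left xs [x])
    · rw [if_neg h]
      exact ih.append (List.Sublist.refl [x])

theorem ofList_len_iff (l : List Int) : (PySem.Set.ofList l).length = l.length ↔ l.Nodup := by
  constructor
  · intro h
    have heq := (ofList_sublist l).eq_of_length h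
    rw [← heq]
    exact PySem.Set.nodup_ofList l
  · intro h
    rw [PySem.Set.ofList_eq_self_of_nodup l h]

theorem aDigits_bounds : ∀ (n : Int), ∀ d ∈ aDigits n, 0 ≤ d ∧ d < 10 := by
  intro n
  induction n using aDigits.induct with
  | case1 n h ih =>
    rw [aDigits, if_pos h]
    intro d hd
    rcases List.mem_cons.mp hd with rfl | hd'
    · exact ⟨PySem.Int.mod_nonneg _ (by omega), PySem.Int.mod_lt _ (by omega)⟩
    · exact ih d hd'
  | case2 n h =>
    rw [aDigits, if_neg h]
    intro d hd
    cases hd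

theorem aDigits_ne_nil (n : Int) (hn : 0 < n) : aDigits n ≠ [] := by
  rw [aDigits, if_pos hn]
  simp

theorem aDigits_last : ∀ (n : Int), 0 < n → ∃ x, (aDigits n).getLast? = some x ∧ 1 ≤ x := by
  intro n
  induction n using aDigits.induct with
  | case1 n h ih =>
    intro _
    by_cases hq : 0 < PySem.Int.floordiv n 10
    · obtain ⟨x, hx, h1⟩ := ih hq
      refine ⟨x, ?_, h1⟩
      rw [aDigits, if_pos h, List.getLast?_cons, hx]
      simp
    · have hfd : PySem.Int.floordiv n 10 = 0 := by
        rw [PySem.Int.floordiv_eq_ediv_of_pos (by omega : (0:Int) < 10)] at hq ⊢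
        omega
      have hnil : aDigits (PySem.Int.floordiv n 10) = [] := by
        rw [hfd, aDigits]
        simp
      have hmod := PySem.Int.floordiv_mul_add_mod n 10
      rw [hfd] at hmod
      refine ⟨PySem.Int.mod n 10, ?_, by omega⟩
      rw [aDigits, if_pos h, hnil]
      simp
  | case2 n h =>
    intro hn
    exact absurd hn h

theorem bDigits_eq_reverse : ∀ (n : Int), bDigits n = (aDigits n).reverse := by
  intro n
  induction n using bDigits.induct with
  | case1 n h ih => rw [bDigits, aDigits, if_pos h, if_pos h, ih, List.reverse_cons]
  | case2 n h => rw [bDigits, aDigits, if_neg h, if_neg h, List.reverse_nil]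

-- A's first loop (counts of strictly shorter special numbers)
theorem lenloop_val : ∀ (m : Nat), 1 ≤ m →
    (PySem.List.pyRange 1 (m : Int) 1).foldl (fun ans i =>
      ans + ((PySem.List.pyRange 0 (i - 1) 1).foldl
          (fun (tu : Int × Int) _ => (tu.1 * tu.2, tu.2 - 1)) ((9 : Int), (9 : Int))).1) 0
      = Slen (m - 1) := by
  intro m
  induction m with
  | zero => omega
  | succ m ih =>
    intro _
    by_cases hm : m = 0
    · subst hm
      rw [show ((1 : Nat) : Int) = 1 by norm_num,
        PySem.List.pyRange_one_eq_nil (by norm_num : (1:Int) ≤ 1)]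
      simp [Slen]
    · have h1m : 1 ≤ m := by omega
      have hsplit : PySem.List.pyRange 1 ((m + 1 : Nat) : Int) 1
          = PySem.List.pyRange 1 ((m : Nat) : Int) 1 ++ [((m : Nat) : Int)] := by
        have hcast : ((m + 1 : Nat) : Int) = ((m : Nat) : Int) + 1 := by push_cast; ring
        rw [hcast]
        exact PySem.List.pyRange_one_succ_right (by exact_mod_cast h1m)
      rw [hsplit, List.foldl_append, ih h1m, List.foldl_cons, List.foldl_nil]
      have hbound : ((m : Nat) : Int) - 1 = ((m - 1 : Nat) : Int) := by
        push_cast [h1m]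
        omega
      rw [hbound, perm_val]
      rw [Int.toNat_natCast]
      rw [show m + 1 - 1 = (m - 1) + 1 by omega, Slen]

theorem main_eq (n : Int) (hn : 0 ≤ n) : countSpecialNumbers n = countSpecialNumbers_alt n := by
  rcases eq_or_lt_of_le hn with hz | hpos
  · rw [← hz]
    have ha : aDigits 0 = [] := by rw [aDigits]; simp
    have hbb : bDigits 0 = [] := by rw [bDigits]; simp
    rw [countSpecialNumbers, countSpecialNumbers_alt, ha, hbb]
    simp [aLoop, bCount, PySem.List.pyRange_one_eq_nil (by norm_num : (0:Int) ≤ 1),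
      PySem.Set.ofList_nil]
  · -- n ≥ 1
    have hbd := bDigits_eq_reverse n
    have hbnd := aDigits_bounds n
    obtain ⟨x, hxlast, hx1⟩ := aDigits_last n hpos
    have hner : (aDigits n).reverse ≠ [] := by
      simp [aDigits_ne_nil n hpos]
    obtain ⟨d0, rest', hrev⟩ : ∃ d0 rest', (aDigits n).reverse = d0 :: rest' := by
      cases h : (aDigits n).reverse with
      | nil => exact absurd h hner
      | cons a t => exact ⟨a, t, rfl⟩
    have hd0x : d0 = x := by
      have hh : (aDigits n).reverse.head? = (aDigits n).getLast? := List.head?_reverse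
      rw [hrev, hxlast] at hh
      simpa using hh
    have hd01 : 1 ≤ d0 := hd0x ▸ hx1
    have hrb : ∀ e ∈ d0 :: rest', 0 ≤ e ∧ e < 10 := by
      intro e he
      apply hbnd
      rw [← List.mem_reverse, hrev]
      exact he
    obtain ⟨hd00, hd010⟩ := hrb d0 (List.mem_cons_self)
    have hm : (aDigits n).length = rest'.length + 1 := by
      have := congrArg List.length hrev
      simpa using this
    have hrepl : List.replicate 10 (0:Int) = visOf 0 := by decide
    set c : Int := ffall 9 rest'.length with hc
    -- A side
    rw [countSpecialNumbers]
    simp only [hrev, hrepl]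
    rw [hm]
    have hlenA : (PySem.List.pyRange 1 ((rest'.length + 1 : Nat) : Int) 1).foldl (fun ans i =>
        ans + ((PySem.List.pyRange 0 (i - 1) 1).foldl
            (fun (tu : Int × Int) _ => (tu.1 * tu.2, tu.2 - 1)) ((9 : Int), (9 : Int))).1) 0
        = Slen rest'.length := by
      have := lenloop_val (rest'.length + 1) (by omega)
      simpa using this
    rw [hlenA]
    simp only [aLoop]
    simp only [reduceIte, Nat.cast_zero, sub_zero, zero_add]
    have hstepA : ∀ (acc j : Int), j ∈ PySem.List.pyRange 1 d0 1 →
        (if PySem.List.pyGetD (visOf 0) j 0 ≠ 0 then acc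
          else acc + ((PySem.List.pyRange 0 (((d0 :: rest').length : Int) - 1) 1).foldl
              (fun (tu : Int × Int) _ => (tu.1 * tu.2, tu.2 - 1)) ((1 : Int), 9)).1)
          = acc + c := by
      intro acc j hj
      have hj' := (PySem.List.mem_pyRange_one).mp hj
      have hjcast : ((j.toNat : Nat) : Int) = j := Int.toNat_of_nonneg (by omega)
      have hget : PySem.List.pyGetD (visOf 0) j 0 = 0 := by
        rw [← hjcast, vis_get 0 j.toNat (by omega), if_pos (freeB_zero j.toNat)]
      rw [if_neg (by simp [hget])]
      have hbound : (((d0 :: rest').length : Int) - 1) = ((rest'.length : Nat) : Int) := by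
        push_cast [List.length_cons]
        omega
      rw [hbound, perm_val]
      simp [hc]
    have hfoldA := PySem.List.foldl_congr_mem _ _ _ (Slen rest'.length) hstepA
    rw [hfoldA, PySem.List.foldl_add]
    set S9 : Int := ((PySem.List.pyRange 1 d0 1).map (fun _ => c)).sum with hS9
    have hgd0 : PySem.List.pyGetD (visOf 0) d0 0 = 0 := by
      have hdcast : ((d0.toNat : Nat) : Int) = d0 := Int.toNat_of_nonneg hd00
      rw [← hdcast, vis_get 0 d0.toNat (by omega), if_pos (freeB_zero d0.toNat)]
    rw [if_neg (show ¬ (PySem.List.pyGetD (visOf 0) d0 0 ≠ 0) by simp [hgd0])]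
    have hvs : PySem.List.pySetD (visOf 0) d0 1 = visOf (1 <<< d0.toNat) := by
      rw [PySem.List.pySetD_of_nonneg (visOf 0) 1 hd00, vis_set 0 d0.toNat (by omega)]
      congr 1
      exact (Nat.zero_or _)
    rw [hvs, aLoop_acc]
    set AT : Int := aLoop (d0 :: rest') rest' 1 (visOf (1 <<< d0.toNat)) 0 with hAT
    -- B side
    rw [countSpecialNumbers_alt, hbd, hrev, bCount_cons_top,
      PySem.List.pyRange_one_cons (by omega : (0:Int) < d0 + 1), List.foldl_cons]
    simp only [zero_add]
    rw [if_pos (by decide : ((0:Int) == 0) = true)]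
    rw [show ((0:Int) == d0) = false by simp; omega]
    rw [bCount_skip]
    rw [PySem.List.pyRange_one_succ_right (by omega : (1:Int) ≤ d0), List.foldl_append]
    have hstepB : ∀ (acc j : Int), j ∈ PySem.List.pyRange 1 d0 1 →
        (if j == 0 then acc + bCount rest' 0 (j == d0) false
          else acc + bCount rest' (1 <<< j.toNat) (j == d0) true)
          = acc + c := by
      intro acc j hj
      have hj' := (PySem.List.mem_pyRange_one).mp hj
      rw [if_neg (by simp; omega), show (j == d0) = false by simp; omega, bCount_free]
      have hu : usedCt (1 <<< j.toNat) = 1 := by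
        have h := usedCt_or 0 j.toNat (by omega) (freeB_zero j.toNat)
        simpa [usedCt_zero] using h
      rw [hu]
      norm_num [hc]
    have hfoldB := PySem.List.foldl_congr_mem _ _ _ (1 + Slen rest'.length) hstepB
    rw [hfoldB, PySem.List.foldl_add, ← hS9]
    rw [List.foldl_cons, List.foldl_nil]
    rw [if_neg (by simp; omega : ¬ (d0 == 0) = true)]
    rw [show (d0 == d0) = true by simp]
    have hT := bCount_tight rest' 1 (1 <<< d0.toNat) (d0 :: rest') (by omega)
      (by
        have h := usedCt_or 0 d0.toNat (by omega) (freeB_zero d0.toNat)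
        simpa [usedCt_zero] using h)
      (by simp; omega)
      (fun e he => hrb e (List.mem_cons_of_mem _ he))
    rw [hT, ← hAT]
    -- final bookkeeping: the +1 for n itself
    have hchain : (PySem.Set.ofList (d0 :: rest')).length = (d0 :: rest').length
        ↔ chainOK (1 <<< d0.toNat) rest' = true := by
      rw [ofList_len_iff]
      have h0 := chainOK_nodup (d0 :: rest') 0 hrb
      have hck : chainOK 0 (d0 :: rest') = chainOK (1 <<< d0.toNat) rest' := by
        rw [chainOK]
        simp [freeB_zero, Nat.zero_or]
      rw [hck] at h0
      rw [h0]
      simp [freeB_zero]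
    rw [if_pos (by omega : (1:Int) ≤ n)]
    by_cases hOK : chainOK (1 <<< d0.toNat) rest' = true
    · rw [if_pos (hchain.mpr hOK), if_pos hOK]
      ring
    · rw [if_neg (fun h => hOK (hchain.mp h)), if_neg hOK]
      ring

-- ===== VERDICT (by name: the statement is the Claim_ definition above) =====
theorem countSpecialNumbers_spec : Claim_equal_countSpecialNumbers := by
  intro n _ hpre
  unfold Spec_countSpecialNumbers
  exact main_eq n hpre
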